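-- pv_equiv track=rewrite | github.com/Njoselson/language_game | spanish_game.py | parse_phrases
-- ===== SOURCE A (Python) =====
-- def parse_phrases(data):
--     topics = {}
--     current_topic = None
--     current_dialogue = []
--     for line in data.split('\n'):
--         if line.strip().endswith("(Continued)") or line.strip().endswith("Continued)"):
--             if current_topic and current_dialogue:
--                 topics[current_topic].append(current_dialogue)
--             current_topic = line.split("/")[0].strip()
--             topics[current_topic] = []
--             current_dialogue = []
--         elif line.strip() and current_topic:
--             if "S1:" in line or "S2:" in line:
--                 current_dialogue.append(line.strip())
--             else:
--                 if current_dialogue: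
--                     topics[current_topic].append(current_dialogue)
--                 current_dialogue = []
--     if current_topic and current_dialogue:
--         topics[current_topic].append(current_dialogue)
--     return topics
-- ===== SOURCE B (Python) =====
-- def _is_header(line):
--     return line.strip().endswith("Continued)")
--
-- def _parse_runs(body):
--     runs, run = [], []
--     for l in body:
--         s = l.strip()
--         if not s:
--             continue
--         if "S1:" in l or "S2:" in l:
--             run.append(s)
--         elif run:
--             runs.append(run)
--             run = []
--     if run:
--         runs.append(run)
--     return runs
--
-- def parse_phrases(data):
--     lines = data.split('\n')
--     n = len(lines)
--     topics = {}
--     i = 0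
--     while i < n and not _is_header(lines[i]):
--         i += 1
--     while i < n:
--         name = lines[i].split("/")[0].strip()
--         i += 1
--         body = []
--         while i < n and not _is_header(lines[i]):
--             body.append(lines[i])
--             i += 1
--         topics[name] = _parse_runs(body) if name else []
--     return topics
-- ===== Notes on version B (the rewrite author's own statement) =====
-- stated objective: alternative
-- what changed: A is a one-pass state machine that flushes pending dialogue into a dict on each header/non-dialogue line; B instead scans to each header line, collects that header's block of body lines, and parses the block's dialogue runs with a separate helper before assigning topics[name] once per block.
import Mathlib
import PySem

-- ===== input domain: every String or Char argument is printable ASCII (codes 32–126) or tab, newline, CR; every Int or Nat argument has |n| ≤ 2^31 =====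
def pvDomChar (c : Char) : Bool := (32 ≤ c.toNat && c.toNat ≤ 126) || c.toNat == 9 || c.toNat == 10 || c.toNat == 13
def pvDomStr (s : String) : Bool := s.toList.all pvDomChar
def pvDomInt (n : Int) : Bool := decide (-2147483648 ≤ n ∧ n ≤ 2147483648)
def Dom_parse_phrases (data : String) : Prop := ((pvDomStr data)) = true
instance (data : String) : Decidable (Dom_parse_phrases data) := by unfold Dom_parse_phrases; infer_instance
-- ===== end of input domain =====

-- B re-implements A's one-pass state machine as a block-wise scan (skip to the first header,
-- then take each header's body and parse its dialogue runs); same output, similar cost.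

-- shared primitive wrapper: Python s.split(sep); every use below has sep ≠ "", where split? is exact
def pvSplit (s sep : String) : List String := (PySem.Str.split? s sep).getD []

-- ===== PORT A =====
-- loop body of A's 'for line in data.split('\n')'; state = (topics, current_topic, current_dialogue)
def pvStepA (st : PySem.Dict String (List (List String)) × Option String × List String)
    (line : String) : PySem.Dict String (List (List String)) × Option String × List String :=
  match st with
  | (topics, ct, cd) =>
    if PySem.Str.endswith (PySem.Str.strip line) "(Continued)"
        || PySem.Str.endswith (PySem.Str.strip line) "Continued)" then
      -- 'if current_topic and current_dialogue: topics[current_topic].append(current_dialogue)'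
      -- (the key is always present: it was inserted when current_topic was set, so modify is exact)
      let topics :=
        match ct with
        | some t => if t ≠ "" ∧ cd ≠ [] then topics.modify t [] (fun v => v ++ [cd]) else topics
        | none => topics
      let name := PySem.Str.strip ((pvSplit line "/").headD "")
      (topics.insert name [], some name, [])
    else
      match ct with
      | some t =>
        if PySem.Str.strip line ≠ "" ∧ t ≠ "" then
          if PySem.Str.isIn "S1:" line || PySem.Str.isIn "S2:" line then
            (topics, some t, cd ++ [PySem.Str.strip line])
          else
            ((if cd ≠ [] then topics.modify t [] (fun v => v ++ [cd]) else topics), some t, [])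
        else (topics, some t, cd)
      | none => (topics, none, cd)

def parse_phrases (data : String) : List (String × List (List String)) :=
  match (pvSplit data "\n").foldl pvStepA (PySem.Dict.empty, none, []) with
  | (topics, ct, cd) =>
    (match ct with
     | some t => if t ≠ "" ∧ cd ≠ [] then topics.modify t [] (fun v => v ++ [cd]) else topics
     | none => topics).items

-- ===== PORT B =====
def pvHdrB (line : String) : Bool := PySem.Str.endswith (PySem.Str.strip line) "Continued)"

-- loop body of _parse_runs; state = (runs, run)
def pvRunStep (st : List (List String) × List String) (l : String) :
    List (List String) × List String :=
  match st with
  | (runs, run) =>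
    let s := PySem.Str.strip l
    if s = "" then (runs, run)
    else if PySem.Str.isIn "S1:" l || PySem.Str.isIn "S2:" l then (runs, run ++ [s])
    else if run ≠ [] then (runs ++ [run], []) else (runs, run)

def pvParseRuns (body : List String) : List (List String) :=
  match body.foldl pvRunStep ([], []) with
  | (runs, run) => if run ≠ [] then runs ++ [run] else runs

-- first while loop: advance to the first header line
def pvSkipPre : List String → List String
  | [] => []
  | l :: ls => if pvHdrB l then l :: ls else pvSkipPre ls

-- second while loop: at each header, collect its body (inner while) and record the topic
def pvGoB : List String → PySem.Dict String (List (List String)) →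
    PySem.Dict String (List (List String))
  | [], topics => topics
  | l :: ls, topics =>
    let name := PySem.Str.strip ((pvSplit l "/").headD "")
    let body := ls.takeWhile (fun x => !pvHdrB x)
    let rest := ls.dropWhile (fun x => !pvHdrB x)
    pvGoB rest (topics.insert name (if name ≠ "" then pvParseRuns body else []))
  termination_by ls _ => ls.length
  decreasing_by
    have h := ls.length_dropWhile_le (fun x => !pvHdrB x)
    simp only [List.length_cons]
    omega

def parse_phrases_alt (data : String) : List (String × List (List String)) :=
  (pvGoB (pvSkipPre (pvSplit data "\n")) PySem.Dict.empty).items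

-- ===== PRECONDITION & SPEC =====
def Spec_parse_phrases (data : String) (out : List (String × List (List String))) : Prop := out = parse_phrases_alt data
instance (data : String) (out : List (String × List (List String))) : Decidable (Spec_parse_phrases data out) := by unfold Spec_parse_phrases; infer_instance

-- ===== CLAIM (what is proved, stated in full; the proofs are below) =====
def Claim_equal_parse_phrases : Prop := ∀ (data : String), Dom_parse_phrases data → Spec_parse_phrases data (parse_phrases data)

-- ===== LEMMAS AND PROOFS =====

-- A's final flush, as a named function (proof-side; parse_phrases inlines it)
def pvFinish (st : PySem.Dict String (List (List String)) × Option String × List String) :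
    PySem.Dict String (List (List String)) :=
  match st with
  | (topics, ct, cd) =>
    match ct with
    | some t => if t ≠ "" ∧ cd ≠ [] then topics.modify t [] (fun v => v ++ [cd]) else topics
    | none => topics

-- append the flushed runs one by one, the way A's loop does
def pvAppRuns (d : PySem.Dict String (List (List String))) (t : String)
    (rs : List (List String)) : PySem.Dict String (List (List String)) :=
  rs.foldl (fun d r => d.modify t [] (fun v => v ++ [r])) d

lemma pvEndsParen (s : String) (h : PySem.Str.endswith s "(Continued)" = true) :
    PySem.Str.endswith s "Continued)" = true := by
  simp only [PySem.Str.endswith_eq, PySem.Chars.endswith_iff] at h ⊢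
  exact List.IsSuffix.trans ⟨['('], rfl⟩ h

lemma pvHdr_eq (l : String) :
    (PySem.Str.endswith (PySem.Str.strip l) "(Continued)"
      || PySem.Str.endswith (PySem.Str.strip l) "Continued)") = pvHdrB l := by
  unfold pvHdrB
  cases h1 : PySem.Str.endswith (PySem.Str.strip l) "(Continued)"
  · rw [Bool.false_or]
  · rw [pvEndsParen _ h1, Bool.true_or]

lemma pvRunStep_acc (body : List String) (rs0 : List (List String)) (run : List String) :
    body.foldl pvRunStep (rs0, run)
      = (rs0 ++ (body.foldl pvRunStep ([], run)).1, (body.foldl pvRunStep ([], run)).2) := by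
  induction body generalizing rs0 run with
  | nil => simp
  | cons l body ih =>
    simp only [List.foldl_cons]
    by_cases hs : PySem.Str.strip l = ""
    · have e1 : pvRunStep (rs0, run) l = (rs0, run) := by
        simp only [pvRunStep]; rw [if_pos hs]
      have e2 : pvRunStep ([], run) l = ([], run) := by
        simp only [pvRunStep]; rw [if_pos hs]
      rw [e1, e2]; exact ih rs0 run
    · by_cases hS : (PySem.Str.isIn "S1:" l || PySem.Str.isIn "S2:" l) = true
      · have e1 : pvRunStep (rs0, run) l = (rs0, run ++ [PySem.Str.strip l]) := by
          simp only [pvRunStep]; rw [if_neg hs, if_pos hS]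
        have e2 : pvRunStep ([], run) l = ([], run ++ [PySem.Str.strip l]) := by
          simp only [pvRunStep]; rw [if_neg hs, if_pos hS]
        rw [e1, e2]; exact ih rs0 (run ++ [PySem.Str.strip l])
      · by_cases hr : run = []
        · subst hr
          have e1 : pvRunStep (rs0, ([] : List String)) l = (rs0, []) := by
            simp only [pvRunStep]; rw [if_neg hs, if_neg hS, if_neg (by simp)]
          have e2 : pvRunStep (([] : List (List String)), ([] : List String)) l = ([], []) := by
            simp only [pvRunStep]; rw [if_neg hs, if_neg hS, if_neg (by simp)]
          rw [e1, e2]; exact ih rs0 []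
        · have e1 : pvRunStep (rs0, run) l = (rs0 ++ [run], []) := by
            simp only [pvRunStep]; rw [if_neg hs, if_neg hS, if_pos hr]
          have e2 : pvRunStep ([], run) l = ([run], []) := by
            simp only [pvRunStep]; rw [if_neg hs, if_neg hS, if_pos hr]; simp
          rw [e1, e2, ih (rs0 ++ [run]) [], ih [run] []]
          simp

lemma pvAppRuns_insert (rs : List (List String)) (d : PySem.Dict String (List (List String)))
    (t : String) (acc : List (List String)) :
    pvAppRuns (d.insert t acc) t rs = d.insert t (acc ++ rs) := by
  induction rs generalizing acc with
  | nil => simp [pvAppRuns]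
  | cons r rs ih =>
    unfold pvAppRuns
    simp only [List.foldl_cons]
    have e : (d.insert t acc).modify t [] (fun v => v ++ [r]) = d.insert t (acc ++ [r]) := by
      unfold PySem.Dict.modify
      rw [PySem.Dict.getD_insert_self, PySem.Dict.insert_insert_self]
    rw [e]
    have h := ih (acc ++ [r])
    unfold pvAppRuns at h
    rw [h]
    simp

-- body fold for a truthy topic: A's interleaved flushes = run-fold + appended runs
lemma pvBody_truthy (body : List String) (hb : ∀ l ∈ body, pvHdrB l = false)
    (d : PySem.Dict String (List (List String))) (t : String) (cd : List String) (ht : t ≠ "") :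
    body.foldl pvStepA (d, some t, cd)
      = (pvAppRuns d t (body.foldl pvRunStep ([], cd)).1, some t,
          (body.foldl pvRunStep ([], cd)).2) := by
  induction body generalizing d cd with
  | nil => simp [pvAppRuns]
  | cons l body ih =>
    have hbl : pvHdrB l = false := hb l (List.mem_cons_self ..)
    have hb' : ∀ x ∈ body, pvHdrB x = false := fun x hx => hb x (List.mem_cons_of_mem _ hx)
    simp only [List.foldl_cons]
    by_cases hs : PySem.Str.strip l = ""
    · have eA : pvStepA (d, some t, cd) l = (d, some t, cd) := by
        simp only [pvStepA]
        rw [pvHdr_eq, hbl, if_neg Bool.false_ne_true, if_neg (by simp [hs])]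
      have eR : pvRunStep (([] : List (List String)), cd) l = ([], cd) := by
        simp only [pvRunStep]; rw [if_pos hs]
      rw [eA, eR]; exact ih hb' d cd
    · by_cases hS : (PySem.Str.isIn "S1:" l || PySem.Str.isIn "S2:" l) = true
      · have eA : pvStepA (d, some t, cd) l = (d, some t, cd ++ [PySem.Str.strip l]) := by
          simp only [pvStepA]
          rw [pvHdr_eq, hbl, if_neg Bool.false_ne_true, if_pos ⟨hs, ht⟩, if_pos hS]
        have eR : pvRunStep (([] : List (List String)), cd) l = ([], cd ++ [PySem.Str.strip l]) := by
          simp only [pvRunStep]; rw [if_neg hs, if_pos hS]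
        rw [eA, eR]; exact ih hb' d (cd ++ [PySem.Str.strip l])
      · by_cases hc : cd = []
        · subst hc
          have eA : pvStepA (d, some t, ([] : List String)) l = (d, some t, []) := by
            simp only [pvStepA]
            rw [pvHdr_eq, hbl, if_neg Bool.false_ne_true, if_pos ⟨hs, ht⟩, if_neg hS,
              if_neg (by simp)]
          have eR : pvRunStep (([] : List (List String)), ([] : List String)) l = ([], []) := by
            simp only [pvRunStep]; rw [if_neg hs, if_neg hS, if_neg (by simp)]
          rw [eA, eR]; exact ih hb' d []
        · have eA : pvStepA (d, some t, cd) l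
              = (d.modify t [] (fun v => v ++ [cd]), some t, []) := by
            simp only [pvStepA]
            rw [pvHdr_eq, hbl, if_neg Bool.false_ne_true, if_pos ⟨hs, ht⟩, if_neg hS, if_pos hc]
          have eR : pvRunStep (([] : List (List String)), cd) l = ([cd], []) := by
            simp only [pvRunStep]; rw [if_neg hs, if_neg hS, if_pos hc]; simp
          rw [eA, eR, ih hb' (d.modify t [] (fun v => v ++ [cd])) [],
            pvRunStep_acc body [cd] []]
          have e2 : ∀ X, pvAppRuns (d.modify t [] (fun v => v ++ [cd])) t X
              = pvAppRuns d t (cd :: X) := fun X => rfl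
          rw [e2]
          simp

-- body fold for the empty topic name: A ignores every non-header line
lemma pvBody_empty (body : List String) (hb : ∀ l ∈ body, pvHdrB l = false)
    (d : PySem.Dict String (List (List String))) (cd : List String) :
    body.foldl pvStepA (d, some "", cd) = (d, some "", cd) := by
  induction body with
  | nil => simp
  | cons l body ih =>
    have hbl : pvHdrB l = false := hb l (List.mem_cons_self ..)
    have hb' : ∀ x ∈ body, pvHdrB x = false := fun x hx => hb x (List.mem_cons_of_mem _ hx)
    simp only [List.foldl_cons]
    have eA : pvStepA (d, some "", cd) l = (d, some "", cd) := by
      simp only [pvStepA]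
      rw [pvHdr_eq, hbl, if_neg Bool.false_ne_true, if_neg (by simp)]
    rw [eA]; exact ih hb'

lemma pvDropWhile_head_false {α : Type} (p : α → Bool) :
    ∀ (l : List α) (x : α) (xs : List α), l.dropWhile p = x :: xs → p x = false := by
  intro l
  induction l with
  | nil => intro x xs h; simp at h
  | cons a l ih =>
    intro x xs h
    by_cases ha : p a = true
    · rw [List.dropWhile_cons_of_pos ha] at h; exact ih x xs h
    · rw [List.dropWhile_cons_of_neg ha] at h
      cases h
      simpa using ha

-- header step of A, from an arbitrary running state
lemma pvStepA_header (d : PySem.Dict String (List (List String))) (ct : Option String)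
    (cd : List String) (l : String) (hH : pvHdrB l = true) :
    pvStepA (d, ct, cd) l
      = ((match ct with
          | some t => if t ≠ "" ∧ cd ≠ [] then d.modify t [] (fun v => v ++ [cd]) else d
          | none => d).insert (PySem.Str.strip ((pvSplit l "/").headD "")) [],
         some (PySem.Str.strip ((pvSplit l "/").headD "")), []) := by
  cases ct <;> · simp only [pvStepA]; rw [pvHdr_eq, hH, if_pos rfl]

-- main block lemma: from the state right after a header, A's fold = B's block recursion
lemma pvMain (n : ℕ) : ∀ (ls : List String), ls.length ≤ n →
    ∀ (d : PySem.Dict String (List (List String))) (t : String),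
    pvFinish (ls.foldl pvStepA (d.insert t [], some t, []))
      = pvGoB (ls.dropWhile (fun x => !pvHdrB x))
          (d.insert t (if t ≠ "" then pvParseRuns (ls.takeWhile (fun x => !pvHdrB x)) else [])) := by
  induction n with
  | zero =>
    intro ls hls d t
    have hnil : ls = [] := List.eq_nil_of_length_eq_zero (Nat.le_zero.mp hls)
    subst hnil
    by_cases ht : t = "" <;> simp [pvFinish, pvGoB, pvParseRuns, ht]
  | succ n ih =>
    intro ls hls d t
    have hsplit : ls.takeWhile (fun x => !pvHdrB x) ++ ls.dropWhile (fun x => !pvHdrB x) = ls :=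
      List.takeWhile_append_dropWhile
    have hb : ∀ l ∈ ls.takeWhile (fun x => !pvHdrB x), pvHdrB l = false := by
      intro l hl
      have := List.mem_takeWhile_imp hl
      simpa using this
    conv_lhs => rw [← hsplit]
    rw [List.foldl_append]
    by_cases ht : t = ""
    · subst ht
      rw [pvBody_empty _ hb]
      cases hrest : List.dropWhile (fun x => !pvHdrB x) ls with
      | nil => simp [pvFinish, pvGoB]
      | cons hl ls2 =>
        have hH : pvHdrB hl = true := by
          have := pvDropWhile_head_false (fun x => !pvHdrB x) ls hl ls2 hrest
          simpa using this
        simp only [List.foldl_cons]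
        rw [pvStepA_header _ _ _ _ hH]
        simp only [ne_eq, not_true_eq_false, false_and, if_false]
        have hlen : ls2.length ≤ n := by
          have h2 := congrArg List.length hsplit
          rw [hrest] at h2
          simp at h2
          omega
        rw [ih ls2 hlen (d.insert "" []) (PySem.Str.strip ((pvSplit hl "/").headD ""))]
        rw [pvGoB]
    · rw [pvBody_truthy _ hb _ t [] ht]
      rcases hq : (List.takeWhile (fun x => !pvHdrB x) ls).foldl pvRunStep ([], []) with ⟨X, Y⟩
      change pvFinish (List.foldl pvStepA (pvAppRuns (d.insert t []) t X, some t, Y)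
        (List.dropWhile (fun x => !pvHdrB x) ls)) = _
      rw [pvAppRuns_insert X d t []]
      simp only [List.nil_append]
      have hPR : pvParseRuns (List.takeWhile (fun x => !pvHdrB x) ls)
          = if Y ≠ [] then X ++ [Y] else X := by
        unfold pvParseRuns
        rw [hq]
      have hmod : (d.insert t X).modify t [] (fun v => v ++ [Y]) = d.insert t (X ++ [Y]) := by
        unfold PySem.Dict.modify
        rw [PySem.Dict.getD_insert_self, PySem.Dict.insert_insert_self]
      cases hrest : List.dropWhile (fun x => !pvHdrB x) ls with
      | nil =>
        rw [pvGoB]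
        simp only [pvFinish, hPR, if_pos ht]
        by_cases hY : Y = []
        · simp [hY, ht]
        · simp [hY, ht, hmod]
      | cons hl ls2 =>
        have hH : pvHdrB hl = true := by
          have := pvDropWhile_head_false (fun x => !pvHdrB x) ls hl ls2 hrest
          simpa using this
        simp only [List.foldl_cons]
        rw [pvStepA_header _ _ _ _ hH]
        have hflush : (if t ≠ "" ∧ Y ≠ [] then (d.insert t X).modify t [] (fun v => v ++ [Y])
              else d.insert t X) = d.insert t (if Y ≠ [] then X ++ [Y] else X) := by
          by_cases hY : Y = []
          · simp [hY]
          · rw [if_pos ⟨ht, hY⟩, if_pos hY, hmod]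
        simp only [hflush]
        have hlen : ls2.length ≤ n := by
          have h2 := congrArg List.length hsplit
          rw [hrest] at h2
          simp at h2
          omega
        rw [ih ls2 hlen _ (PySem.Str.strip ((pvSplit hl "/").headD ""))]
        rw [pvGoB]
        simp only [hPR, if_pos ht]

lemma pvTop (ls : List String) (d : PySem.Dict String (List (List String))) :
    pvFinish (ls.foldl pvStepA (d, none, [])) = pvGoB (pvSkipPre ls) d := by
  induction ls generalizing d with
  | nil => simp [pvFinish, pvSkipPre, pvGoB]
  | cons l ls ih =>
    simp only [List.foldl_cons]
    cases hH : pvHdrB l with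
    | false =>
      have eA : pvStepA (d, none, []) l = (d, none, []) := by
        simp only [pvStepA]
        rw [pvHdr_eq, hH, if_neg Bool.false_ne_true]
      rw [eA, pvSkipPre]
      simp only [hH, Bool.false_eq_true, if_false]
      exact ih d
    | true =>
      rw [pvStepA_header _ _ _ _ hH, pvSkipPre]
      simp only [hH, if_true]
      rw [pvMain ls.length ls le_rfl d (PySem.Str.strip ((pvSplit l "/").headD ""))]
      rw [pvGoB]

-- ===== VERDICT (by name: the statement is the Claim_ definition above) =====
theorem parse_phrases_spec : Claim_equal_parse_phrases := by
  intro data _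
  show parse_phrases data = parse_phrases_alt data
  have h := pvTop (pvSplit data "\n") PySem.Dict.empty
  unfold parse_phrases parse_phrases_alt
  rw [← h]
  rfl
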